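-- pv_equiv track=rewrite | github.com/bexh/bexh-connector-aws-ecs | src/app/event_connector/event_consumer.py | _create_suggest_input
-- ===== SOURCE A (Python) =====
-- def _create_suggest_input(home_team: str, away_team: str):
--     inputs = []
--     title = f"{home_team.lower()} vs {away_team.lower()}"
--     reverse_title = f"{away_team.lower()} vs {home_team.lower()}"
--     for title in [title, reverse_title]:
--         split_title = title.split(" ")
--         for i in range(len(split_title) - 1):
--             inputs.append(" ".join(split_title[i:]))
--     return inputs
-- ===== SOURCE B (Python) =====
-- def _suffixes(title):
--     rev = title.split(" ")[::-1]
--     suffix = rev[0]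
--     acc = []
--     for w in rev[1:]:
--         suffix = w + " " + suffix
--         acc.insert(0, suffix)
--     return acc
--
-- def _create_suggest_input(home_team: str, away_team: str):
--     h, a = home_team.lower(), away_team.lower()
--     return _suffixes(h + " vs " + a) + _suffixes(a + " vs " + h)
-- ===== Notes on version B (the rewrite author's own statement) =====
-- stated objective: alternative
-- what changed: Instead of re-slicing the word list and re-joining split_title[i:] for every index i, B walks each title's word list right-to-left once, growing a single suffix-string accumulator and collecting each intermediate suffix (longest first).
import Mathlib
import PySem

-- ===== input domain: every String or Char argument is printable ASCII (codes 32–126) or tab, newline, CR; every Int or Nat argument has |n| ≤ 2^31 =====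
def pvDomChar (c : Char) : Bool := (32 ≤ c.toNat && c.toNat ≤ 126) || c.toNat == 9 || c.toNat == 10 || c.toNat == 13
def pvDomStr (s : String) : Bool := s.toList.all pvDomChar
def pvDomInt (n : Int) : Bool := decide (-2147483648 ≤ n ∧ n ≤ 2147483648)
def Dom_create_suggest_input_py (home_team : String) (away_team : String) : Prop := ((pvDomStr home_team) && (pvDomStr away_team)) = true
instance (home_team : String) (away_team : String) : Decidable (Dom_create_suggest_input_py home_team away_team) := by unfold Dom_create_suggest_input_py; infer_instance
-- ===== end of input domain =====

-- B replaces A's per-index re-slice-and-rejoin of the word list by a single right-to-left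
-- walk that grows one suffix accumulator (objective: alternative decomposition, same cost class).


-- f-string "x vs y" (shared literal construction: both Pythons build the titles identically)
def pvMkTitle (x y : String) : String := String.ofList (x.toList ++ (' ' :: 'v' :: 's' :: ' ' :: []) ++ y.toList)

-- ===== PORT A =====
def create_suggest_input_py (home_team : String) (away_team : String) : List String :=
  let title := pvMkTitle (PySem.Str.lower home_team) (PySem.Str.lower away_team)
  let reverse_title := pvMkTitle (PySem.Str.lower away_team) (PySem.Str.lower home_team)
  [title, reverse_title].foldl
    (fun inputs t =>
      let split_title := (PySem.Str.split? t " ").getD []   -- " " ≠ "" so split? is always some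
      (PySem.List.pyRange 0 ((split_title.length : Int) - 1) 1).foldl
        (fun acc i => acc ++ [PySem.Str.join " " (PySem.List.slice split_title (some i) none)])
        inputs)
    []

-- ===== PORT B =====
-- w + " " + suffix
def pvCat (w s : String) : String := String.ofList (w.toList ++ ' ' :: s.toList)

-- the loop 'for w in rev[1:]: suffix = w + " " + suffix; acc.insert(0, suffix)'
def pvGo : List String → String → List String → List String
  | [], _, acc => acc
  | w :: ws, s, acc => pvGo ws (pvCat w s) (pvCat w s :: acc)

def pvSuffixes (t : String) : List String :=
  match ((PySem.Str.split? t " ").getD []).reverse with   -- rev = title.split(" ")[::-1]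
  | [] => []                                              -- unreachable (split is never empty); totality only
  | l :: rest => pvGo rest l []

def create_suggest_input_py_alt (home_team : String) (away_team : String) : List String :=
  let h := PySem.Str.lower home_team
  let a := PySem.Str.lower away_team
  pvSuffixes (pvMkTitle h a) ++ pvSuffixes (pvMkTitle a h)

-- ===== PRECONDITION & SPEC =====
def Spec_create_suggest_input_py (home_team : String) (away_team : String) (out : List String) : Prop := out = create_suggest_input_py_alt home_team away_team
instance (home_team : String) (away_team : String) (out : List String) : Decidable (Spec_create_suggest_input_py home_team away_team out) := by unfold Spec_create_suggest_input_py; infer_instance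

-- ===== CLAIM (what is proved, stated in full; the proofs are below) =====
def Claim_equal_create_suggest_input_py : Prop := ∀ (home_team : String) (away_team : String), Dom_create_suggest_input_py home_team away_team → Spec_create_suggest_input_py home_team away_team (create_suggest_input_py home_team away_team)

-- ===== LEMMAS AND PROOFS =====

-- non-accumulator characterisation of pvGo
def pvChain : List String → String → List String
  | [], _ => []
  | w :: ws, s => pvChain ws (pvCat w s) ++ [pvCat w s]

theorem pvGo_eq_chain (l : List String) (s : String) (acc : List String) :
    pvGo l s acc = pvChain l s ++ acc := by
  induction l generalizing s acc with
  | nil => simp [pvGo, pvChain]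
  | cons w ws ih => simp [pvGo, pvChain, ih]

theorem pvChain_snoc (xs : List String) (w : String) (s : String) :
    pvChain (xs ++ [w]) s
      = pvCat w (xs.foldl (fun s x => pvCat x s) s) :: pvChain xs s := by
  induction xs generalizing s with
  | nil => simp [pvChain]
  | cons x xs ih => simp [pvChain, ih]

-- " ".join as the string-list join
def pvJ (l : List String) : String := PySem.Str.join " " l

theorem pvJ_cons (w : String) (l : List String) (h : l ≠ []) :
    pvJ (w :: l) = pvCat w (pvJ l) := by
  obtain ⟨x, xs, rfl⟩ := List.exists_cons_of_ne_nil h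
  apply String.ext
  simp [pvJ, pvCat, PySem.Str.toList_join, PySem.Chars.join_cons_cons]

theorem pvJ_eq_foldr (ws : List String) (h : ws ≠ []) :
    pvJ ws = ws.dropLast.foldr pvCat (ws.getLastD "") := by
  induction ws with
  | nil => simp at h
  | cons w rest ih =>
    cases rest with
    | nil =>
      apply String.ext
      simp [pvJ, PySem.Str.toList_join, PySem.Chars.join_singleton]
    | cons x xs =>
      rw [pvJ_cons w _ (by simp), ih (by simp)]
      simp [List.dropLast, List.getLastD]

-- per-word-list core: B's suffix chain equals A's per-index join of drops
theorem chain_eq_map_range (front : List String) (last : String) :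
    pvChain front.reverse last
      = (List.range front.length).map (fun k => pvJ ((front ++ [last]).drop k)) := by
  induction front generalizing last with
  | nil => simp [pvChain]
  | cons w rest ih =>
    have hfold : (rest.reverse).foldl (fun s x => pvCat x s) last = rest.foldr pvCat last :=
      List.foldl_reverse
    have hJ : pvJ (rest ++ [last]) = rest.foldr pvCat last := by
      rw [pvJ_eq_foldr _ (by simp)]
      simp
    have hhead : pvCat w (pvJ (rest ++ [last])) = pvJ (w :: (rest ++ [last])) :=
      (pvJ_cons w _ (by simp)).symm
    calc pvChain ((w :: rest).reverse) last
        = pvChain (rest.reverse ++ [w]) last := by simp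
      _ = pvCat w ((rest.reverse).foldl (fun s x => pvCat x s) last) :: pvChain rest.reverse last := pvChain_snoc _ _ _
      _ = pvJ (w :: (rest ++ [last])) :: (List.range rest.length).map (fun k => pvJ ((rest ++ [last]).drop k)) := by
          rw [hfold, ← hJ, hhead, ih]
      _ = (List.range (w :: rest).length).map (fun k => pvJ (((w :: rest) ++ [last]).drop k)) := by
          simp [List.range_succ_eq_map, List.map_map, Function.comp_def]

-- A's inner loop over one title's word list equals B's pvSuffixes chain
theorem innerA_eq (ws : List String) (init : List String) :
    (PySem.List.pyRange 0 ((ws.length : Int) - 1) 1).foldl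
      (fun acc i => acc ++ [PySem.Str.join " " (PySem.List.slice ws (some i) none)]) init
    = init ++ (match ws.reverse with | [] => [] | l :: rest => pvGo rest l []) := by
  rcases List.eq_nil_or_concat ws with rfl | ⟨front, last, rfl⟩
  · simp [PySem.List.pyRange_one_eq_nil]
  · rw [List.concat_eq_append]
    have hrev : (front ++ [last]).reverse = last :: front.reverse := by simp
    rw [hrev]
    have hlen : (((front ++ [last]).length : Int) - 1) = (front.length : Int) := by
      simp
    rw [hlen, PySem.List.pyRange_one, PySem.List.foldl_append_singleton_eq_map, List.map_map]
    rw [show (match last :: front.reverse with | [] => ([] : List String) | l :: rest => pvGo rest l []) = pvGo front.reverse last [] from rfl]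
    rw [pvGo_eq_chain, chain_eq_map_range]
    simp only [List.append_nil, Int.sub_zero, Int.toNat_natCast]
    congr 1
    apply List.map_congr_left
    intro k hk
    simp [PySem.List.slice_from_natCast, pvJ]

-- ===== VERDICT (by name: the statement is the Claim_ definition above) =====
theorem create_suggest_input_py_spec : Claim_equal_create_suggest_input_py := by
  intro h a _
  unfold Spec_create_suggest_input_py create_suggest_input_py create_suggest_input_py_alt pvSuffixes
  simp only [List.foldl_cons, List.foldl_nil]
  rw [innerA_eq, innerA_eq]
  simp
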